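-- pv_equiv track=rewrite | github.com/ljdongz/algorithm-study | 프로그래머스/3/12987. 숫자 게임/숫자 게임.py | solution
-- ===== SOURCE A (Python) =====
-- from collections import deque
--
-- def solution(A, B):
--     answer = 0
--
--     A.sort()
--     B.sort()
--     B = deque(B)
--
--     for n in A:
--
--         while B:
--             if B.popleft() > n:
--                 answer += 1
--                 break
--
--     return answer
-- ===== SOURCE B (Python) =====
-- def solution(A, B):
--     A.sort()
--     B.sort()
--     count = 0
--     i = 0
--     for b in B:
--         if i < len(A) and b > A[i]:
--             count += 1
--             i += 1
--     return count
-- ===== Notes on version B (the rewrite author's own statement) =====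
-- stated objective: simpler
-- what changed: Replaces the deque-consuming inner while loop (for each a, pop B until an element beats it) with a single pass over sorted B advancing one index into sorted A, with no deque and no inner loop.
import Mathlib
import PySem

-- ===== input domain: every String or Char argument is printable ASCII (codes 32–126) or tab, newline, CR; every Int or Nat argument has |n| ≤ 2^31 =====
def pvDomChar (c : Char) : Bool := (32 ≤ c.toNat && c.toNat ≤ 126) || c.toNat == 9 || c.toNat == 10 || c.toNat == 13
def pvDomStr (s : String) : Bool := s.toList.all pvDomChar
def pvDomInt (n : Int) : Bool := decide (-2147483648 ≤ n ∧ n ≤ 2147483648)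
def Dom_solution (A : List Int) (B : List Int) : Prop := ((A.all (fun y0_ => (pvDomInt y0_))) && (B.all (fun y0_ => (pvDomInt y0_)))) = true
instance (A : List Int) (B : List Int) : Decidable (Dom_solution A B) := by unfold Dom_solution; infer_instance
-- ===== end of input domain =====

-- B replaces A's deque-consuming inner while loop with a single pass over sorted B
-- advancing one index into sorted A (simpler; same count). Both versions sort the
-- argument lists in place in Python; the theorems here are about the return value.

-- ===== PORT A =====
-- inner 'while B: if B.popleft() > n: answer += 1; break' — returns the remaining
-- queue if a beating element was found (answer += 1), none if the queue ran out
def solInner (n : Int) : List Int → Option (List Int)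
  | [] => none
  | b :: rest => if b > n then some rest else solInner n rest

-- 'for n in A' loop carrying (answer, queue)
def solLoop (answer : Int) (q : List Int) : List Int → Int
  | [] => answer
  | n :: ns =>
      match solInner n q with
      | some rest => solLoop (answer + 1) rest ns
      | none => solLoop answer [] ns

def solution (A : List Int) (B : List Int) : Int :=
  solLoop 0 (PySem.List.sorted B (fun x => x) false) (PySem.List.sorted A (fun x => x) false)

-- ===== PORT B =====
-- 'for b in B' loop carrying (i, count); A[i] guarded by i < len(A)
def altLoop (A : List Int) : Nat → Int → List Int → Int
  | _, count, [] => count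
  | i, count, b :: bs =>
      if i < A.length && A.getD i 0 < b then altLoop A (i + 1) (count + 1) bs
      else altLoop A i count bs

def solution_alt (A : List Int) (B : List Int) : Int :=
  altLoop (PySem.List.sorted A (fun x => x) false) 0 0 (PySem.List.sorted B (fun x => x) false)

-- ===== PRECONDITION & SPEC =====
def Spec_solution (A : List Int) (B : List Int) (out : Int) : Prop := out = solution_alt A B
instance (A : List Int) (B : List Int) (out : Int) : Decidable (Spec_solution A B out) := by unfold Spec_solution; infer_instance

-- ===== CLAIM (what is proved, stated in full; the proofs are below) =====
def Claim_equal_solution : Prop := ∀ (A : List Int) (B : List Int), Dom_solution A B → Spec_solution A B (solution A B)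

-- ===== LEMMAS AND PROOFS =====

-- common reference function: for each a (in order), drop the b's ≤ a, consume one b > a
def refCount : List Int → List Int → Int
  | [], _ => 0
  | a :: as, q =>
      match q.dropWhile (fun b => decide (b ≤ a)) with
      | [] => 0
      | _ :: r => 1 + refCount as r

theorem refCount_nil : ∀ as : List Int, refCount as [] = 0 := by
  intro as; cases as <;> simp [refCount]

theorem solInner_eq (n : Int) (q : List Int) :
    solInner n q =
      match q.dropWhile (fun b => decide (b ≤ n)) with
      | [] => none
      | _ :: r => some r := by
  induction q with
  | nil => simp [solInner]
  | cons b rest ih =>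
      by_cases h : b > n
      · simp [solInner, h, List.dropWhile, not_le.mpr h]
      · simp only [solInner, if_neg h, ih, List.dropWhile, decide_eq_true (not_lt.mp h)]

theorem solLoop_eq (ns : List Int) : ∀ (answer : Int) (q : List Int),
    solLoop answer q ns = answer + refCount ns q := by
  induction ns with
  | nil => intro answer q; simp [solLoop, refCount]
  | cons n ns ih =>
      intro answer q
      rw [solLoop, solInner_eq]
      rcases hd : q.dropWhile (fun b => decide (b ≤ n)) with _ | ⟨b, r⟩
      · simp only [refCount, hd, ih, refCount_nil]
      · simp only [refCount, hd, ih]; ring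

theorem altLoop_eq (bs : List Int) : ∀ (A : List Int) (i : Nat) (count : Int),
    altLoop A i count bs = count + refCount (A.drop i) bs := by
  induction bs with
  | nil => intro A i count; simp [altLoop, refCount_nil]
  | cons b bs ih =>
      intro A i count
      rw [altLoop]
      by_cases hi : i < A.length
      · have hdrop : A.drop i = A[i] :: A.drop (i + 1) := List.drop_eq_getElem_cons hi
        have hgd : A.getD i 0 = A[i] := List.getD_eq_getElem A 0 hi
        by_cases hb : A[i] < b
        · rw [if_pos (by simp [hi, hb])]
          rw [ih, hdrop, refCount]
          simp only [List.dropWhile, decide_eq_false (not_le.mpr hb)]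
          ring
        · rw [if_neg (by simp [hi, not_lt.mp hb])]
          rw [ih, hdrop]
          simp only [refCount, List.dropWhile, decide_eq_true (not_lt.mp hb)]
      · rw [if_neg (by simp [hi])]
        rw [ih, List.drop_eq_nil_of_le (le_of_not_gt hi)]
        simp [refCount]

-- ===== VERDICT (by name: the statement is the Claim_ definition above) =====
theorem solution_spec : Claim_equal_solution := by
  intro A B _
  unfold Spec_solution solution solution_alt
  rw [solLoop_eq, altLoop_eq, List.drop_zero]
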